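-- pv_equiv track=rewrite | github.com/paiml/depyler | examples/hard_numeric_patterns.py | sum_of_powers_mod
-- ===== SOURCE A (Python) =====
-- def power_mod(base: int, exp: int, mod: int) -> int:
--     """Modular exponentiation: (base^exp) % mod."""
--     if mod <= 0:
--         return 0
--     if mod == 1:
--         return 0
--     if exp < 0:
--         return 0
--     result: int = 1
--     b: int = base % mod
--     if b < 0:
--         b = b + mod
--     e: int = exp
--     while e > 0:
--         if e & 1 == 1:
--             result = (result * b) % mod
--         e = e >> 1
--         b = (b * b) % mod
--     return result
--
-- def sum_of_powers_mod(n: int, k: int, mod: int) -> int: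
--     """Compute (1^k + 2^k + ... + n^k) % mod."""
--     if n <= 0 or mod <= 0:
--         return 0
--     result: int = 0
--     i: int = 1
--     while i <= n:
--         result = (result + power_mod(i, k, mod)) % mod
--         i = i + 1
--     return result
-- ===== SOURCE B (Python) =====
-- def power_mod(base: int, exp: int, mod: int) -> int:
--     """Modular exponentiation: (base^exp) % mod."""
--     if mod <= 0:
--         return 0
--     if mod == 1:
--         return 0
--     if exp < 0:
--         return 0
--     result: int = 1
--     b: int = base % mod
--     if b < 0:
--         b = b + mod
--     e: int = exp
--     while e > 0:
--         if e & 1 == 1: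
--             result = (result * b) % mod
--         e = e >> 1
--         b = (b * b) % mod
--     return result
--
-- def sum_of_powers_mod(n: int, k: int, mod: int) -> int:
--     """Compute (1^k + 2^k + ... + n^k) % mod, exploiting that i^k % mod
--     depends only on i % mod: each residue power is computed once, weighted by
--     how many i in [1, n] fall on that residue."""
--     if n <= 0 or mod <= 0:
--         return 0
--     q, s = divmod(n, mod)
--     # residues r >= n + 1 never occur in [1, n] (only possible when q == 0)
--     total = 0
--     for r in range(min(mod, n + 1)):
--         cnt = q + (1 if 1 <= r <= s else 0)
--         total = (total + power_mod(r, k, mod) * cnt) % mod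
--     return total
-- ===== Notes on version B (the rewrite author's own statement) =====
-- stated objective: alternative
-- what changed: Instead of A's loop over every i in [1, n], B loops over the residues r of mod (capped at min(mod, n+1)): power_mod(i,k,mod) depends only on i % mod, so B computes each residue's power once and weights it by how many i in [1, n] hit that residue (n//mod full cycles plus the tail 1..n%mod).
import Mathlib
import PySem

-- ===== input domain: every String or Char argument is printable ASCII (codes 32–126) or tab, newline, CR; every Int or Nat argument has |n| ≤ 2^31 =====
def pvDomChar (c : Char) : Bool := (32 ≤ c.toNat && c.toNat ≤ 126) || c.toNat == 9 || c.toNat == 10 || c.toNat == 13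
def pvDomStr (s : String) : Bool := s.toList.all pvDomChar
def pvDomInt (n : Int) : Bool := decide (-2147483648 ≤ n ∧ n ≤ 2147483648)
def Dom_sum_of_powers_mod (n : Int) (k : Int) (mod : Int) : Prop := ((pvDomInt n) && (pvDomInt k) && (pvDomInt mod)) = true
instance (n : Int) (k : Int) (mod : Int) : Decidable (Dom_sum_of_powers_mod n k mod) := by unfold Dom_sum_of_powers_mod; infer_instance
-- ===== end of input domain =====

-- B replaces A's loop over all i in [1, n] by a loop over the residues of mod
-- (capped at min(mod, n+1)): each residue's power is computed once and weighted
-- by its occurrence count; same return value everywhere.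

-- ===== PORT A =====
-- while-loop of power_mod; state (result, b, e).  'e & 1' and 'e >> 1' are
-- ported as e % 2 and floordiv e 2, exact since e > 0 inside the loop.
def pmLoop (mod : Int) (result b e : Int) : Int :=
  if h : 0 < e then
    pmLoop mod (if e % 2 = 1 then (result * b) % mod else result)
      ((b * b) % mod) (PySem.Int.floordiv e 2)
  else result
termination_by e.toNat
decreasing_by
  rw [PySem.Int.floordiv_eq_ediv_of_pos (by omega : (0:Int) < 2)]
  omega

def power_mod (base : Int) (exp : Int) (mod : Int) : Int :=
  if mod ≤ 0 then 0
  else if mod = 1 then 0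
  else if exp < 0 then 0
  else
    -- Python's 'base % mod' is emod here since mod > 0 on this branch
    let b := base % mod
    let b := if b < 0 then b + mod else b
    pmLoop mod 1 b exp

-- while i <= n: result = (result + power_mod(i, k, mod)) % mod; i += 1
-- ('%' is emod: this loop only runs under the guard mod > 0)
def sumLoopA (n k mod : Int) (i result : Int) : Int :=
  if h : i ≤ n then
    sumLoopA n k mod (i + 1) ((result + power_mod i k mod) % mod)
  else result
termination_by (n + 1 - i).toNat
decreasing_by omega

def sum_of_powers_mod (n : Int) (k : Int) (mod : Int) : Int :=
  if n ≤ 0 ∨ mod ≤ 0 then 0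
  else sumLoopA n k mod 1 0

-- ===== PORT B =====
-- for r in range(limit): total = (total + power_mod(r,k,mod) * cnt) % mod
-- ('%' is emod: this loop only runs under the guard mod > 0)
def sumLoopB (k mod q s limit : Int) (r total : Int) : Int :=
  if h : r < limit then
    sumLoopB k mod q s limit (r + 1)
      ((total + power_mod r k mod * (q + if 1 ≤ r ∧ r ≤ s then 1 else 0)) % mod)
  else total
termination_by (limit - r).toNat
decreasing_by omega

def sum_of_powers_mod_alt (n : Int) (k : Int) (mod : Int) : Int :=
  if n ≤ 0 ∨ mod ≤ 0 then 0
  else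
    let q := PySem.Int.floordiv n mod
    let s := PySem.Int.mod n mod
    sumLoopB k mod q s (min mod (n + 1)) 0 0

-- ===== PRECONDITION & SPEC =====
def Spec_sum_of_powers_mod (n : Int) (k : Int) (mod : Int) (out : Int) : Prop := out = sum_of_powers_mod_alt n k mod
instance (n : Int) (k : Int) (mod : Int) (out : Int) : Decidable (Spec_sum_of_powers_mod n k mod out) := by unfold Spec_sum_of_powers_mod; infer_instance

-- ===== CLAIM (what is proved, stated in full; the proofs are below) =====
def Claim_equal_sum_of_powers_mod : Prop := ∀ (n : Int) (k : Int) (mod : Int), Dom_sum_of_powers_mod n k mod → Spec_sum_of_powers_mod n k mod (sum_of_powers_mod n k mod)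

-- ===== LEMMAS AND PROOFS =====

-- occurrence count of residue r among 1..N modulo M
def cntN (N M r : ℕ) : Int :=
  ((N / M : ℕ) : Int) + (if 1 ≤ r ∧ r ≤ N % M then 1 else 0)

lemma pm_mod (base k mod : Int) :
    power_mod (base % mod) k mod = power_mod base k mod := by
  simp only [power_mod, Int.emod_emod_of_dvd base (dvd_refl mod)]

lemma sumLoopA_eq (n k mod : Int) :
    ∀ (t : ℕ) (i result : Int), (n + 1 - i).toNat = t → result % mod = result →
      sumLoopA n k mod i result =
        (result + ∑ j ∈ Finset.range t, power_mod (i + (j : Int)) k mod) % mod := by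
  intro t
  induction t with
  | zero =>
    intro i result ht hres
    rw [sumLoopA, dif_neg (by omega : ¬ i ≤ n)]
    simp [hres]
  | succ t ih =>
    intro i result ht hres
    rw [sumLoopA, dif_pos (by omega : i ≤ n)]
    rw [ih (i + 1) _ (by omega) (Int.emod_emod_of_dvd _ (dvd_refl mod))]
    rw [Int.emod_add_emod]
    congr 1
    rw [Finset.sum_range_succ']
    have : ∀ j ∈ Finset.range t,
        power_mod (i + 1 + (j : Int)) k mod = power_mod (i + ((j + 1 : ℕ) : Int)) k mod := by
      intro j _; congr 1; push_cast; ring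
    rw [Finset.sum_congr rfl this, Nat.cast_zero, add_zero]
    ring

lemma sumLoopB_eq (k mod q s limit : Int) :
    ∀ (t : ℕ) (r total : Int), (limit - r).toNat = t → total % mod = total →
      sumLoopB k mod q s limit r total =
        (total + ∑ j ∈ Finset.range t,
            power_mod (r + (j : Int)) k mod *
              (q + if 1 ≤ r + (j : Int) ∧ r + (j : Int) ≤ s then 1 else 0)) % mod := by
  intro t
  induction t with
  | zero =>
    intro r total ht htot
    rw [sumLoopB, dif_neg (by omega : ¬ r < limit)]
    simp [htot]
  | succ t ih =>
    intro r total ht htot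
    rw [sumLoopB, dif_pos (by omega : r < limit)]
    rw [ih (r + 1) _ (by omega) (Int.emod_emod_of_dvd _ (dvd_refl mod))]
    rw [Int.emod_add_emod]
    congr 1
    rw [Finset.sum_range_succ']
    have : ∀ j ∈ Finset.range t,
        power_mod (r + 1 + (j : Int)) k mod *
            (q + if 1 ≤ r + 1 + (j : Int) ∧ r + 1 + (j : Int) ≤ s then 1 else 0) =
          power_mod (r + ((j + 1 : ℕ) : Int)) k mod *
            (q + if 1 ≤ r + ((j + 1 : ℕ) : Int) ∧ r + ((j + 1 : ℕ) : Int) ≤ s then 1 else 0) := by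
      intro j _
      have : r + 1 + (j : Int) = r + ((j + 1 : ℕ) : Int) := by push_cast; ring
      rw [this]
    rw [Finset.sum_congr rfl this, Nat.cast_zero, add_zero]
    ring

lemma cnt_succ (N M r : ℕ) (hM : 0 < M) (hr : r < M) :
    cntN (N + 1) M r = cntN N M r + (if r = (N + 1) % M then 1 else 0) := by
  have hdm := Nat.div_add_mod N M
  have hs : N % M < M := Nat.mod_lt _ hM
  by_cases hc : N % M + 1 = M
  · have hN : N + 1 = M * (N / M + 1) := by rw [Nat.mul_add, Nat.mul_one]; omega
    have h1 : (N + 1) % M = 0 := by rw [hN]; exact Nat.mul_mod_right _ _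
    have h2 : (N + 1) / M = N / M + 1 := by rw [hN]; exact Nat.mul_div_cancel_left _ hM
    unfold cntN
    rw [h1, h2]
    split_ifs <;> push_cast <;> omega
  · have hN : N + 1 = (N % M + 1) + M * (N / M) := by omega
    have h1 : (N + 1) % M = N % M + 1 := by
      rw [hN, Nat.add_mul_mod_self_left]
      exact Nat.mod_eq_of_lt (by omega)
    have h2 : (N + 1) / M = N / M := by
      rw [hN, Nat.add_mul_div_left _ _ hM, Nat.div_eq_of_lt (by omega)]
      omega
    unfold cntN
    rw [h1, h2]
    split_ifs <;> push_cast <;> omega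

lemma core_sum (H : ℕ → Int) (M : ℕ) (hM : 0 < M) (N : ℕ) :
    ∑ i ∈ Finset.range N, H ((i + 1) % M) = ∑ r ∈ Finset.range M, H r * cntN N M r := by
  induction N with
  | zero =>
    rw [Finset.sum_range_zero]
    refine (Finset.sum_eq_zero ?_).symm
    intro r _
    have : cntN 0 M r = 0 := by
      unfold cntN
      rw [Nat.zero_div, Nat.zero_mod]
      split_ifs with h
      · omega
      · simp
    rw [this, mul_zero]
  | succ N ih =>
    rw [Finset.sum_range_succ, ih]
    have key : ∀ r ∈ Finset.range M,
        H r * cntN (N + 1) M r =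
          H r * cntN N M r + (if r = (N + 1) % M then H r else 0) := by
      intro r hr
      rw [cnt_succ N M r hM (Finset.mem_range.mp hr), mul_add]
      congr 1
      split_ifs <;> simp
    rw [Finset.sum_congr rfl key, Finset.sum_add_distrib, Finset.sum_ite_eq' (Finset.range M)]
    rw [if_pos (Finset.mem_range.mpr (Nat.mod_lt _ hM))]

lemma cnt_zero_of_big (N M r : ℕ) (hNM : N < M) (hr : N + 1 ≤ r) : cntN N M r = 0 := by
  unfold cntN
  rw [Nat.div_eq_of_lt hNM, Nat.mod_eq_of_lt hNM]
  split_ifs with h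
  · omega
  · simp

lemma sum_min_eq (H : ℕ → Int) (M N : ℕ) (hM : 0 < M) :
    ∑ r ∈ Finset.range (min M (N + 1)), H r * cntN N M r =
      ∑ r ∈ Finset.range M, H r * cntN N M r := by
  by_cases h : M ≤ N + 1
  · rw [min_eq_left h]
  · have hNM : N + 1 ≤ M := by omega
    rw [min_eq_right hNM]
    refine Finset.sum_subset (fun x hx => Finset.mem_range.mpr (lt_of_lt_of_le (Finset.mem_range.mp hx) hNM)) ?_
    intro r hrM hrL
    have hr1 : N + 1 ≤ r := by
      rw [Finset.mem_range] at hrL; omega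
    rw [cnt_zero_of_big N M r (by omega) hr1, mul_zero]

-- ===== VERDICT (by name: the statement is the Claim_ definition above) =====
theorem sum_of_powers_mod_spec : Claim_equal_sum_of_powers_mod := by
  intro n k mod _
  unfold Spec_sum_of_powers_mod
  by_cases hg : n ≤ 0 ∨ mod ≤ 0
  · simp [sum_of_powers_mod, sum_of_powers_mod_alt, hg]
  · rw [not_or, not_le, not_le] at hg
    obtain ⟨hn, hm⟩ := hg
    obtain ⟨N, hN⟩ : ∃ N : ℕ, n = (N : Int) := ⟨n.toNat, by omega⟩
    obtain ⟨M, hM⟩ : ∃ M : ℕ, mod = (M : Int) := ⟨mod.toNat, by omega⟩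
    have hM0 : 0 < M := by omega
    set H : ℕ → Int := fun r => power_mod (r : Int) k mod with hH
    -- A side
    have hA : sum_of_powers_mod n k mod =
        (∑ i ∈ Finset.range N, H ((i + 1) % M)) % mod := by
      rw [sum_of_powers_mod, if_neg (by omega)]
      rw [sumLoopA_eq n k mod N 1 0 (by omega) (by simp)]
      rw [zero_add]
      congr 1
      refine Finset.sum_congr rfl ?_
      intro j _
      have e1 : (1 : Int) + (j : Int) = (((j + 1 : ℕ) : Int)) := by push_cast; ring
      rw [e1, ← pm_mod ((j + 1 : ℕ) : Int) k mod, hM]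
      rw [show (((j + 1 : ℕ) : Int)) % ((M : ℕ) : Int) = (((j + 1) % M : ℕ) : Int) by push_cast; ring_nf]
      rw [hH, ← hM]
    -- B side
    have hB : sum_of_powers_mod_alt n k mod =
        (∑ r ∈ Finset.range (min M (N + 1)), H r * cntN N M r) % mod := by
      rw [sum_of_powers_mod_alt, if_neg (by omega)]
      have hq : PySem.Int.floordiv n mod = ((N / M : ℕ) : Int) := by
        rw [hN, hM]; exact PySem.Int.floordiv_natCast N M
      have hs : PySem.Int.mod n mod = ((N % M : ℕ) : Int) := by
        rw [hN, hM]; exact PySem.Int.mod_natCast N M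
      have hlim : min mod (n + 1) = ((min M (N + 1) : ℕ) : Int) := by
        rw [hN, hM]; simp [Nat.cast_min]
      simp only [hq, hs, hlim]
      rw [sumLoopB_eq k mod _ _ _ (min M (N + 1)) 0 0 (by omega) (by simp)]
      rw [zero_add]
      congr 1
      refine Finset.sum_congr rfl ?_
      intro j _
      rw [zero_add]
      unfold cntN
      congr 1
      congr 1
      split_ifs with h1 h2 h2
      · rfl
      · exact absurd ⟨by exact_mod_cast h1.1, by exact_mod_cast h1.2⟩ h2
      · exact absurd ⟨by exact_mod_cast h2.1, by exact_mod_cast h2.2⟩ h1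
      · rfl
    rw [hA, hB, sum_min_eq H M N hM0, core_sum H M hM0 N]
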